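-- pv_equiv track=rewrite | github.com/RishabSA/interp-refusal-tokens | OLD_refactored_scripts/scripts/refusal_tokens_converted.py | score_refusal_token
-- ===== SOURCE A (Python) =====
-- def score_refusal_token(sequences):
--     refusal_tokens = [
--         "[Humanizing requests]",
--         "[Incomplete requests]",
--         "[Indeterminate requests]",
--         "[Requests with safety concerns]",
--         "[Unsupported requests]",
--     ]
--
--     num_refusal = 0
--
--     for i in range(len(sequences)):
--         generated_seq = sequences[i]
--
--         # Check if any refusal token is in the generated sequence
--         for refusal_token in refusal_tokens:
--             if refusal_token in generated_seq:
--                 num_refusal += 1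
--                 break
--
--     return num_refusal
-- ===== SOURCE B (Python) =====
-- REFUSAL_TOKENS = [
--     "[Humanizing requests]",
--     "[Incomplete requests]",
--     "[Indeterminate requests]",
--     "[Requests with safety concerns]",
--     "[Unsupported requests]",
-- ]
--
--
-- def _build_trie(tokens):
--     # Prefix trie: dict-of-dicts; "" key marks the end of a stored token.
--     root = {}
--     for token in tokens:
--         node = root
--         for ch in token:
--             node = node.setdefault(ch, {})
--         node[""] = True
--     return root
--
--
-- def _match_at(root, s, i):
--     # Walk the trie along s starting at position i; True iff some stored
--     # token starts at i.
--     node = root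
--     while True:
--         if "" in node:
--             return True
--         if i >= len(s) or s[i] not in node:
--             return False
--         node = node[s[i]]
--         i += 1
--
--
-- def score_refusal_token(sequences):
--     # Build one combined trie of the five tokens, then make a single
--     # trie-walk scan over each sequence instead of five substring scans.
--     root = _build_trie(REFUSAL_TOKENS)
--     count = 0
--     for seq in sequences:
--         if any(_match_at(root, seq, i) for i in range(len(seq))):
--             count += 1
--     return count
-- ===== Notes on version B (the rewrite author's own statement) =====
-- stated objective: alternative
-- what changed: B builds a prefix trie (dict-of-dicts) of the five refusal tokens once and counts sequences via a single trie-walk scan per position, instead of A's five independent substring scans with an inner token loop and break.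
import Mathlib
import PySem

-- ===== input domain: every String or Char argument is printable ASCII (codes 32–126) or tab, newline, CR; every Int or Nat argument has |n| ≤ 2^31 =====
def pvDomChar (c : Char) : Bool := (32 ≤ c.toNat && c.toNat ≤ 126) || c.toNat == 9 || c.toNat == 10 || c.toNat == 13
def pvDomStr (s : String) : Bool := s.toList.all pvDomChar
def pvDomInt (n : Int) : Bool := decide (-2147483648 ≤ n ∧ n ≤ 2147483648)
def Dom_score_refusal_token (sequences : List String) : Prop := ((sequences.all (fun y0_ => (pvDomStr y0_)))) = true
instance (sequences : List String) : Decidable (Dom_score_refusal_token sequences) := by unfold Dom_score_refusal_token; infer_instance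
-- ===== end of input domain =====

-- B replaces A's five per-token substring scans (inner loop with break) by one prefix trie
-- of the tokens, built once, walked from every position of each sequence (objective: alternative).

-- ===== PORT A =====
def pvRefusalTokens : List String :=
  ["[Humanizing requests]",
   "[Incomplete requests]",
   "[Indeterminate requests]",
   "[Requests with safety concerns]",
   "[Unsupported requests]"]

-- the inner 'for refusal_token in refusal_tokens: if … : break' loop
def pvInnerLoop : List String → String → Bool
  | [], _ => false
  | t :: ts, s => if PySem.Str.isIn t s then true else pvInnerLoop ts s

def score_refusal_token (sequences : List String) : Int :=
  (PySem.List.pyRange 0 (PySem.List.len sequences) 1).foldl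
    (fun num_refusal i =>
      let generated_seq := PySem.List.pyGetD sequences i ""
      if pvInnerLoop pvRefusalTokens generated_seq then num_refusal + 1 else num_refusal)
    0

-- ===== PORT B =====
-- the dict-of-dicts trie of Source B: a node is (terminal marker "" present?, children assoc)
mutual
inductive Trie where
  | mk : Bool → TrieKids → Trie
inductive TrieKids where
  | nil : TrieKids
  | cons : Char → Trie → TrieKids → TrieKids
end

-- dict lookup in a node's children
def kidsFind : TrieKids → Char → Option Trie
  | TrieKids.nil, _ => none
  | TrieKids.cons a t rest, c => if a = c then some t else kidsFind rest c

-- dict overwrite/append (as produced by setdefault + further insertion)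
def kidsSet : TrieKids → Char → Trie → TrieKids
  | TrieKids.nil, c, t => TrieKids.cons c t TrieKids.nil
  | TrieKids.cons a t' rest, c, t =>
      if a = c then TrieKids.cons a t rest else TrieKids.cons a t' (kidsSet rest c t)

-- the 'for ch in token: node = node.setdefault(ch, {})' walk plus final 'node[""] = True'
def pvInsert : Trie → List Char → Trie
  | Trie.mk _ k, [] => Trie.mk true k
  | Trie.mk b k, c :: cs =>
      Trie.mk b (kidsSet k c (pvInsert ((kidsFind k c).getD (Trie.mk false TrieKids.nil)) cs))

-- _build_trie(REFUSAL_TOKENS)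
def pvBuildTrie : Trie :=
  pvRefusalTokens.foldl (fun tr token => pvInsert tr token.toList) (Trie.mk false TrieKids.nil)

-- _match_at's while loop: check the "" marker, then follow s[i] and advance i
def pvMatchAt : Trie → List Char → Bool
  | Trie.mk true _, _ => true
  | Trie.mk false _, [] => false
  | Trie.mk false k, c :: cs =>
      match kidsFind k c with
      | none => false
      | some t' => pvMatchAt t' cs

-- 'any(_match_at(root, seq, i) for i in range(len(seq)))': the i-th iteration sees
-- the suffix of seq starting at i, so the index loop is this structural recursion
def pvHit : Trie → List Char → Bool
  | _, [] => false
  | t, c :: rest => pvMatchAt t (c :: rest) || pvHit t rest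

def score_refusal_token_alt (sequences : List String) : Int :=
  let root := pvBuildTrie
  sequences.foldl (fun count seq => if pvHit root seq.toList then count + 1 else count) 0

-- ===== PRECONDITION & SPEC =====
def Spec_score_refusal_token (sequences : List String) (out : Int) : Prop := out = score_refusal_token_alt sequences
instance (sequences : List String) (out : Int) : Decidable (Spec_score_refusal_token sequences out) := by unfold Spec_score_refusal_token; infer_instance

-- ===== CLAIM (what is proved, stated in full; the proofs are below) =====
def Claim_equal_score_refusal_token : Prop := ∀ (sequences : List String), Dom_score_refusal_token sequences → Spec_score_refusal_token sequences (score_refusal_token sequences)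

-- ===== LEMMAS AND PROOFS =====

-- proof-only spec of trie contents: does the trie store word w?
def wordsB : Trie → List Char → Bool
  | Trie.mk b _, [] => b
  | Trie.mk _ k, c :: cs =>
      match kidsFind k c with
      | none => false
      | some t' => wordsB t' cs

theorem pvInnerLoop_eq_any (ts : List String) (s : String) :
    pvInnerLoop ts s = ts.any (fun t => PySem.Str.isIn t s) := by
  induction ts with
  | nil => rfl
  | cons t ts ih => cases h : PySem.Str.isIn t s <;> simp [pvInnerLoop, ih]

theorem kidsFind_kidsSet : ∀ (k : TrieKids) (c : Char) (t : Trie) (d : Char),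
    kidsFind (kidsSet k c t) d = if c = d then some t else kidsFind k d
  | TrieKids.nil, c, t, d => by simp [kidsSet, kidsFind]
  | TrieKids.cons a t' rest, c, t, d => by
      by_cases hac : a = c
      · subst hac
        by_cases had : a = d <;> simp [kidsSet, kidsFind, had]
      · by_cases hcd : c = d
        · subst hcd
          simp [kidsSet, kidsFind, hac, kidsFind_kidsSet rest]
        · simp [kidsSet, kidsFind, hac, hcd, kidsFind_kidsSet rest]

theorem wordsB_empty (v : List Char) : wordsB (Trie.mk false TrieKids.nil) v = false := by
  cases v <;> simp [wordsB, kidsFind]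

theorem wordsB_insert (w : List Char) : ∀ (t : Trie) (v : List Char),
    (wordsB (pvInsert t w) v = true ↔ v = w ∨ wordsB t v = true) := by
  induction w with
  | nil =>
      rintro ⟨b, k⟩ v
      cases v with
      | nil => simp [pvInsert, wordsB]
      | cons d vs => simp [pvInsert, wordsB]
  | cons c w' ih =>
      rintro ⟨b, k⟩ v
      cases v with
      | nil => simp [pvInsert, wordsB]
      | cons d vs =>
          simp only [pvInsert, wordsB, kidsFind_kidsSet]
          by_cases hcd : c = d
          · subst hcd
            cases h : kidsFind k c with
            | none => simp [ih, wordsB_empty]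
            | some t0 => simp [ih]
          · simp only [if_neg hcd, List.cons.injEq]
            constructor
            · intro h; exact Or.inr h
            · rintro (⟨h, _⟩ | h)
              · exact (hcd h.symm).elim
              · exact h

theorem wordsB_foldl (ss : List String) : ∀ (t : Trie) (v : List Char),
    (wordsB (ss.foldl (fun tr token => pvInsert tr token.toList) t) v = true ↔
      (∃ s ∈ ss, v = s.toList) ∨ wordsB t v = true) := by
  induction ss with
  | nil => intro t v; simp
  | cons s ss ih =>
      intro t v
      simp only [List.foldl_cons, ih, wordsB_insert, List.mem_cons]
      constructor
      · rintro (⟨x, hx, rfl⟩ | (rfl | h))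
        · exact Or.inl ⟨x, Or.inr hx, rfl⟩
        · exact Or.inl ⟨s, Or.inl rfl, rfl⟩
        · exact Or.inr h
      · rintro (⟨x, (rfl | hx), rfl⟩ | h)
        · exact Or.inr (Or.inl rfl)
        · exact Or.inl ⟨x, hx, rfl⟩
        · exact Or.inr (Or.inr h)

theorem wordsB_root (v : List Char) :
    wordsB pvBuildTrie v = true ↔ ∃ s ∈ pvRefusalTokens, v = s.toList := by
  unfold pvBuildTrie
  rw [wordsB_foldl]
  simp [wordsB_empty]

theorem pvMatchAt_iff (cs : List Char) : ∀ (t : Trie),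
    (pvMatchAt t cs = true ↔ ∃ w, wordsB t w = true ∧ w <+: cs) := by
  induction cs with
  | nil =>
      rintro ⟨b, k⟩
      cases b with
      | true => exact ⟨fun _ => ⟨[], rfl, List.prefix_refl _⟩, fun _ => rfl⟩
      | false =>
          simp only [pvMatchAt, Bool.false_eq_true, false_iff]
          rintro ⟨w, hw, hp⟩
          rcases List.prefix_nil.mp hp with rfl
          simp [wordsB] at hw
  | cons c rest ih =>
      rintro ⟨b, k⟩
      cases b with
      | true => exact ⟨fun _ => ⟨[], rfl, List.nil_prefix⟩, fun _ => rfl⟩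
      | false =>
          simp only [pvMatchAt]
          cases h : kidsFind k c with
          | none =>
              simp only [Bool.false_eq_true, false_iff]
              rintro ⟨w, hw, hp⟩
              cases w with
              | nil => simp [wordsB] at hw
              | cons d w' =>
                  rcases List.cons_prefix_cons.mp hp with ⟨rfl, _⟩
                  simp [wordsB, h] at hw
          | some t' =>
              rw [ih t']
              constructor
              · rintro ⟨w', hw, hp⟩
                exact ⟨c :: w', by simp [wordsB, h, hw], List.cons_prefix_cons.mpr ⟨rfl, hp⟩⟩
              · rintro ⟨w, hw, hp⟩
                cases w with
                | nil => simp [wordsB] at hw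
                | cons d w' =>
                    rcases List.cons_prefix_cons.mp hp with ⟨rfl, hp'⟩
                    simp only [wordsB, h] at hw
                    exact ⟨w', hw, hp'⟩

theorem pvHit_iff (cs : List Char) (t : Trie) :
    pvHit t cs = true ↔ ∃ sfx, sfx <:+ cs ∧ sfx ≠ [] ∧ pvMatchAt t sfx = true := by
  induction cs with
  | nil =>
      simp only [pvHit, Bool.false_eq_true, false_iff]
      rintro ⟨sfx, hs, hne, _⟩
      exact hne (List.suffix_nil.mp hs)
  | cons c rest ih =>
      simp only [pvHit, Bool.or_eq_true, ih]
      constructor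
      · rintro (h | ⟨sfx, hs, hne, hm⟩)
        · exact ⟨c :: rest, List.suffix_refl _, by simp, h⟩
        · exact ⟨sfx, hs.trans (List.suffix_cons c rest), hne, hm⟩
      · rintro ⟨sfx, hs, hne, hm⟩
        rcases List.suffix_cons_iff.mp hs with rfl | hs'
        · exact Or.inl hm
        · exact Or.inr ⟨sfx, hs', hne, hm⟩

theorem prefix_suffix_iff_infix {w cs : List Char} (hw : w ≠ []) :
    (∃ sfx, sfx <:+ cs ∧ sfx ≠ [] ∧ w <+: sfx) ↔ w <:+: cs := by
  constructor
  · rintro ⟨sfx, hs, _, hp⟩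
    exact hp.isInfix.trans hs.isInfix
  · rintro ⟨a, b, rfl⟩
    refine ⟨w ++ b, ⟨a, by simp⟩, by simp [hw], List.prefix_append _ _⟩

-- the per-sequence equivalence: A's inner token loop = B's trie scan
theorem inner_eq_hit (s : String) :
    pvInnerLoop pvRefusalTokens s = pvHit pvBuildTrie s.toList := by
  have htok : ∀ w, wordsB pvBuildTrie w = true → w ≠ [] := by
    have hall : ∀ x ∈ pvRefusalTokens, x.toList ≠ [] := by decide
    intro w hw
    rcases (wordsB_root w).mp hw with ⟨x, hx, rfl⟩
    exact hall x hx
  rw [Bool.eq_iff_iff, pvInnerLoop_eq_any, pvHit_iff]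
  constructor
  · intro h
    rcases List.any_eq_true.mp h with ⟨tkn, htkn, hin⟩
    rw [PySem.Str.isIn_eq] at hin
    have hinf := (PySem.Chars.isIn_iff_infix _ _).mp hin
    have hne : tkn.toList ≠ [] := htok _ ((wordsB_root _).mpr ⟨tkn, htkn, rfl⟩)
    rcases (prefix_suffix_iff_infix hne).mpr hinf with ⟨sfx, hs, hne', hp⟩
    exact ⟨sfx, hs, hne', (pvMatchAt_iff sfx pvBuildTrie).mpr
      ⟨tkn.toList, (wordsB_root _).mpr ⟨tkn, htkn, rfl⟩, hp⟩⟩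
  · rintro ⟨sfx, hs, hne, hm⟩
    rcases (pvMatchAt_iff sfx pvBuildTrie).mp hm with ⟨w, hw, hp⟩
    rcases (wordsB_root w).mp hw with ⟨tkn, htkn, rfl⟩
    have hinf : tkn.toList <:+: s.toList :=
      (prefix_suffix_iff_infix (htok _ hw)).mp ⟨sfx, hs, hne, hp⟩
    exact List.any_eq_true.mpr ⟨tkn, htkn, by
      rw [PySem.Str.isIn_eq]; exact (PySem.Chars.isIn_iff_infix _ _).mpr hinf⟩

-- ===== VERDICT (by name: the statement is the Claim_ definition above) =====
theorem score_refusal_token_spec : Claim_equal_score_refusal_token := by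
  intro sequences _
  unfold Spec_score_refusal_token score_refusal_token score_refusal_token_alt
  rw [PySem.List.foldl_pyRange_pyGetD sequences ""
        (fun num_refusal generated_seq =>
          if pvInnerLoop pvRefusalTokens generated_seq then num_refusal + 1 else num_refusal)
        0 (a := 0) (by norm_num)]
  simp only [Int.toNat_zero, List.drop_zero]
  exact List.foldl_ext _ _ _ (fun acc s _ => by rw [inner_eq_hit])
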